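-- pv_equiv track=rewrite | github.com/JiSuMun/Algorithm-Study | W02/KimGyuri/42586.py | solution
-- ===== SOURCE A (Python) =====
-- import math
--
-- def solution(progresses, speeds):
--     days = []
--     answer = []
--
--     for i in range(len(progresses)):
--         take_time = math.ceil((100 - progresses[i]) / speeds[i])
--
--         if i == 0:
--             days.append(take_time)
--         else:
--             if take_time <= days[0]:
--                 days.append(take_time)
--             else:
--                 answer.append(len(days))
--                 days.clear()
--                 days.append(take_time)
--     else:
--         answer.append(len(days))
--
--     return answer
-- ===== SOURCE B (Python) =====
-- import math
--
-- def solution(progresses, speeds):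
--     # pass 1: every task's completion day
--     days = [math.ceil((100 - p) / s) for p, s in zip(progresses, speeds)]
--     # pass 2: running prefix maxima of the days
--     pmax = []
--     for d in days:
--         pmax.append(d if not pmax or d > pmax[-1] else pmax[-1])
--     # pass 3: a new deployment group starts exactly where a day exceeds all earlier days
--     cuts = [0] + [i for i in range(1, len(days)) if days[i] > pmax[i - 1]] + [len(days)]
--     # pass 4: group sizes are the gaps between consecutive cut positions
--     return [b - a for a, b in zip(cuts, cuts[1:])]
-- ===== Notes on version B (the rewrite author's own statement) =====
-- stated objective: alternative
-- what changed: B replaces A's single sweep that grows and clears a per-group list by a staged pipeline: it computes all completion days, their prefix maxima, then the list of group-start positions (a day strictly exceeding every earlier day starts a group, since group leaders form the running maximum), and returns the differences of consecutive cut positions.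
import Mathlib
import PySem

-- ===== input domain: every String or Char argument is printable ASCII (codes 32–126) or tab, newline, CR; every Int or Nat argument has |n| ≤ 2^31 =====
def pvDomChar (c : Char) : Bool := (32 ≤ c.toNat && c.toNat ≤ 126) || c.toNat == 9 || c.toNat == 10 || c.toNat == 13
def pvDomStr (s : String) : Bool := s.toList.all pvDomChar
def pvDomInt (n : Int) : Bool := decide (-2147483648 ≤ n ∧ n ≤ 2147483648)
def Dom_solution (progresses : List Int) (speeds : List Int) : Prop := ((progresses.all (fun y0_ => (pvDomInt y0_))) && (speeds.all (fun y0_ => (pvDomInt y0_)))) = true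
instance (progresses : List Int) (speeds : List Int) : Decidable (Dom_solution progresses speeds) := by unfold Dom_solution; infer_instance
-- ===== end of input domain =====

-- B is a staged pipeline (completion days, prefix maxima, group-start positions, gaps between
-- consecutive cuts) instead of A's single sweep with a growing/cleared group list; objective: alternative.

-- math.ceil((100 - p) / s) = -((-(100 - p)) // s): exact on Dom, where |100 - p| < 2^53
-- makes the correctly-rounded float quotient's ceiling equal the exact ceiling.
def pyCeilDiv (n s : Int) : Int := -(PySem.Int.floordiv (-n) s)

-- ===== PORT A =====
-- loop body of A; progresses[i] is in range (i < len(progresses)), speeds[i] in range under Pre_,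
-- and days[0] is only read when days ≠ [] (i ≠ 0), so getD/headD are exact there.
def solutionStep (progresses : List Int) (speeds : List Int)
    (st : List Int × List Int) (i : Nat) : List Int × List Int :=
  let days := st.1
  let answer := st.2
  let take_time := pyCeilDiv (100 - progresses.getD i 0) (speeds.getD i 0)
  if i = 0 then (days ++ [take_time], answer)
  else if take_time ≤ days.headD 0 then (days ++ [take_time], answer)
  else ([take_time], answer ++ [(days.length : Int)])

def solution (progresses : List Int) (speeds : List Int) : List Int :=
  let st := (List.range progresses.length).foldl (solutionStep progresses speeds) ([], [])
  st.2 ++ [(st.1.length : Int)]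

-- ===== PORT B =====
-- the comprehension [b - a for a, b in zip(cuts, cuts[1:])]
def pvDiffs (l : List Nat) : List Int :=
  (l.zip (l.drop 1)).map (fun p => ((p.2 : Int) - (p.1 : Int)))

-- days[i] and pmax[i-1] are always in range in Source B (1 ≤ i < len(days)), so getD is exact there.
def solution_alt (progresses : List Int) (speeds : List Int) : List Int :=
  let days := (progresses.zip speeds).map (fun q => pyCeilDiv (100 - q.1) q.2)
  let pmax := days.foldl
    (fun acc d => acc ++ [match acc.getLast? with
                          | none => d
                          | some m => if d > m then d else m]) []
  let cuts := [0] ++ (List.range' 1 (days.length - 1)).filter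
    (fun i => decide (days.getD i 0 > pmax.getD (i - 1) 0)) ++ [days.length]
  pvDiffs cuts

-- ===== PRECONDITION & SPEC =====
-- A raises IndexError when speeds is shorter than progresses and ZeroDivisionError on a zero
-- speed among the first len(progresses) speeds; exactly those inputs are excluded.
def Pre_solution (progresses : List Int) (speeds : List Int) : Prop :=
  progresses.length ≤ speeds.length ∧ ∀ x ∈ speeds.take progresses.length, x ≠ 0

instance (progresses : List Int) (speeds : List Int) : Decidable (Pre_solution progresses speeds) := by
  unfold Pre_solution; infer_instance

def pvWitness_solution : List Int × List Int := ([30, 55, 95], [5, 10, 1])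

def Spec_solution (progresses : List Int) (speeds : List Int) (out : List Int) : Prop := out = solution_alt progresses speeds
instance (progresses : List Int) (speeds : List Int) (out : List Int) : Decidable (Spec_solution progresses speeds out) := by unfold Spec_solution; infer_instance

-- ===== CLAIM (what is proved, stated in full; the proofs are below) =====
def Claim_equal_solution : Prop := ∀ (progresses : List Int) (speeds : List Int), Dom_solution progresses speeds → Pre_solution progresses speeds → Spec_solution progresses speeds (solution progresses speeds)

-- ===== LEMMAS AND PROOFS =====

-- canonical grouping of the completion-day list; both ports are reduced to it
def grp : Int → Int → List Int → List Int
  | _, c, [] => [c]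
  | L, c, d :: ds => if d ≤ L then grp L (c + 1) ds else c :: grp d 1 ds

def groupLens : List Int → List Int
  | [] => [0]
  | d :: ds => grp d 1 ds

-- running prefix maxima after a first element with current maximum M
def pm : Int → List Int → List Int
  | _, [] => []
  | M, d :: ds => (if d > M then d else M) :: pm (if d > M then d else M) ds

-- group-start positions from running maximum M, next index j
def cutIdx : Int → Nat → List Int → List Nat
  | _, _, [] => []
  | M, j, d :: ds => if d > M then j :: cutIdx d (j + 1) ds else cutIdx M (j + 1) ds

theorem days_drop (p s : List Int) (hlen : p.length ≤ s.length) (k : Nat) (hk : k < p.length) :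
    ((p.zip s).map (fun q => pyCeilDiv (100 - q.1) q.2)).drop k
      = pyCeilDiv (100 - p.getD k 0) (s.getD k 0)
        :: ((p.zip s).map (fun q => pyCeilDiv (100 - q.1) q.2)).drop (k + 1) := by
  have hzk : k < (p.zip s).length := by simp [Nat.min_eq_left hlen]; omega
  rw [List.drop_eq_getElem_cons (by simpa using hzk)]
  congr 1
  have : (p.zip s)[k] = (p[k], s[k]) := by simp [List.getElem_zip]
  simp [this, List.getElem?_eq_getElem hk, List.getElem?_eq_getElem (by omega : k < s.length)]

theorem solution_go (p s : List Int) (hlen : p.length ≤ s.length) :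
    ∀ (m k : Nat) (daysAcc ansA : List Int),
      m + k = p.length → k ≠ 0 → daysAcc ≠ [] →
      (let st := (List.range' k m).foldl (solutionStep p s) (daysAcc, ansA)
       st.2 ++ [(st.1.length : Int)]) =
      ansA ++ grp (daysAcc.headD 0) (daysAcc.length : Int)
        (((p.zip s).map (fun q => pyCeilDiv (100 - q.1) q.2)).drop k) := by
  intro m
  induction m with
  | zero =>
      intro k daysAcc ansA hm _ _
      have hk : k = p.length := by omega
      have hdrop : (((p.zip s).map (fun q => pyCeilDiv (100 - q.1) q.2)).drop k) = [] := by
        apply List.drop_eq_nil_of_le; simp [hk, Nat.min_eq_left hlen]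
      simp [hdrop, grp]
  | succ m ih =>
      intro k daysAcc ansA hm hk0 hdays
      have hk : k < p.length := by omega
      rw [List.range'_succ, List.foldl_cons, days_drop p s hlen k hk]
      set tt := pyCeilDiv (100 - p.getD k 0) (s.getD k 0) with htt
      by_cases hle : tt ≤ daysAcc.headD 0
      · have hA : solutionStep p s (daysAcc, ansA) k = (daysAcc ++ [tt], ansA) := by
          simp only [solutionStep, if_neg hk0, ← htt, if_pos hle]
        rw [hA, grp, if_pos hle]
        have := ih (k + 1) (daysAcc ++ [tt]) ansA (by omega) (by omega) (by simp)
        rw [this]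
        have hhead : (daysAcc ++ [tt]).headD 0 = daysAcc.headD 0 := by
          cases daysAcc with
          | nil => exact absurd rfl hdays
          | cons a l => simp
        rw [hhead]
        congr 2
        simp
      · have hA : solutionStep p s (daysAcc, ansA) k
            = ([tt], ansA ++ [(daysAcc.length : Int)]) := by
          simp only [solutionStep, if_neg hk0, ← htt, if_neg hle]
        rw [hA, grp, if_neg hle]
        have := ih (k + 1) [tt] (ansA ++ [(daysAcc.length : Int)]) (by omega) (by omega) (by simp)
        rw [this]
        simp

theorem solution_eq_groupLens (p s : List Int) (hlen : p.length ≤ s.length) :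
    solution p s = groupLens ((p.zip s).map (fun q => pyCeilDiv (100 - q.1) q.2)) := by
  unfold solution
  rw [List.range_eq_range']
  cases hn : p.length with
  | zero =>
      have hp0 : p = [] := List.eq_nil_of_length_eq_zero hn
      simp [hp0, groupLens]
  | succ m =>
      rw [List.range'_succ, List.foldl_cons]
      have h0 : solutionStep p s ([], []) 0
          = ([pyCeilDiv (100 - p.getD 0 0) (s.getD 0 0)], []) := by
        simp [solutionStep]
      rw [h0]
      have hgo := solution_go p s hlen m 1 [pyCeilDiv (100 - p.getD 0 0) (s.getD 0 0)] []
        (by omega) (by omega) (by simp)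
      simp only [] at hgo ⊢
      rw [hgo]
      have hd0 := days_drop p s hlen 0 (by omega)
      simp only [List.drop_zero] at hd0
      rw [hd0]
      simp [groupLens]

theorem pmax_fold (ds : List Int) :
    ∀ (acc : List Int) (M : Int), acc.getLast? = some M →
      ds.foldl (fun acc d => acc ++ [match acc.getLast? with
                                     | none => d
                                     | some m => if d > m then d else m]) acc
        = acc ++ pm M ds := by
  induction ds with
  | nil => intro acc M _; simp [pm]
  | cons d ds ih =>
      intro acc M hM
      rw [List.foldl_cons]
      have hstep : acc ++ [match acc.getLast? with
                           | none => d
                           | some m => if d > m then d else m]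
          = acc ++ [if d > M then d else M] := by rw [hM]
      rw [hstep, ih (acc ++ [if d > M then d else M]) (if d > M then d else M)
        (by rw [List.getLast?_concat])]
      simp [pm]

theorem pmax_eq (d : Int) (t : List Int) :
    (d :: t).foldl (fun acc x => acc ++ [match acc.getLast? with
                                         | none => x
                                         | some m => if x > m then x else m]) []
      = d :: pm d t := by
  rw [List.foldl_cons]
  have h0 : ([] : List Int) ++ [match ([] : List Int).getLast? with
             | none => d
             | some m => if d > m then d else m] = [d] := rfl
  rw [h0, pmax_fold t [d] d (by simp)]
  simp

theorem cuts_eq :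
    ∀ (ts : List Int) (M : Int) (j : Nat) (P : Nat → Bool),
      (∀ r, r < ts.length → P (j + r) = decide (ts.getD r 0 > (M :: pm M ts).getD r 0)) →
      (List.range' j ts.length).filter P = cutIdx M j ts := by
  intro ts
  induction ts with
  | nil => intro M j P _; rfl
  | cons d ts ih =>
      intro M j P hP
      rw [List.length_cons, List.range'_succ, List.filter_cons]
      have hPj : P j = decide (d > M) := by
        have := hP 0 (by rw [List.length_cons]; omega)
        simpa using this
      have hrec : ∀ r, r < ts.length →
          P (j + 1 + r)
            = decide (ts.getD r 0 > ((if d > M then d else M) :: pm (if d > M then d else M) ts).getD r 0) := by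
        intro r hr
        have := hP (r + 1) (by rw [List.length_cons]; omega)
        have harg : j + (r + 1) = j + 1 + r := by omega
        rw [harg] at this
        simpa [pm] using this
      by_cases hdM : d > M
      · rw [hPj, ih d (j + 1) P (by simpa [if_pos hdM] using hrec)]
        simp [cutIdx, hdM]
      · rw [hPj, ih M (j + 1) P (by simpa [if_neg hdM] using hrec)]
        simp [cutIdx, hdM]

theorem pvDiffs_cons (a b : Nat) (l : List Nat) :
    pvDiffs (a :: b :: l) = ((b : Int) - (a : Int)) :: pvDiffs (b :: l) := by
  simp [pvDiffs]

theorem diffs_grp :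
    ∀ (ts : List Int) (M : Int) (j prev : Nat),
      pvDiffs (prev :: (cutIdx M j ts ++ [j + ts.length]))
        = grp M ((j : Int) - (prev : Int)) ts := by
  intro ts
  induction ts with
  | nil =>
      intro M j prev
      simp [cutIdx, pvDiffs, grp]
  | cons d ts ih =>
      intro M j prev
      by_cases hdM : d > M
      · have h1 : cutIdx M j (d :: ts) = j :: cutIdx d (j + 1) ts := by
          simp [cutIdx, hdM]
        have h2 : j + (d :: ts).length = (j + 1) + ts.length := by
          rw [List.length_cons]; omega
        have h3 : grp M ((j : Int) - (prev : Int)) (d :: ts)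
            = ((j : Int) - (prev : Int)) :: grp d 1 ts := by
          simp only [grp, if_neg (not_le.mpr hdM)]
        rw [h1, h2, h3]
        rw [show (prev :: (j :: cutIdx d (j + 1) ts ++ [(j + 1) + ts.length]))
              = prev :: j :: (cutIdx d (j + 1) ts ++ [(j + 1) + ts.length]) from rfl]
        rw [pvDiffs_cons, ih d (j + 1) j]
        have hc : (((j + 1 : Nat)) : Int) - ((j : Nat) : Int) = 1 := by push_cast; ring
        rw [hc]
      · have h1 : cutIdx M j (d :: ts) = cutIdx M (j + 1) ts := by
          simp [cutIdx, hdM]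
        have h2 : j + (d :: ts).length = (j + 1) + ts.length := by
          rw [List.length_cons]; omega
        have h3 : grp M ((j : Int) - (prev : Int)) (d :: ts)
            = grp M (((j : Int) - (prev : Int)) + 1) ts := by
          simp only [grp, if_pos (not_lt.mp hdM)]
        rw [h1, h2, h3, ih M (j + 1) prev]
        have hc : (((j + 1 : Nat)) : Int) - ((prev : Nat) : Int)
            = ((j : Int) - (prev : Int)) + 1 := by push_cast; ring
        rw [hc]

theorem alt_eq_groupLens (p s : List Int) :
    solution_alt p s = groupLens ((p.zip s).map (fun q => pyCeilDiv (100 - q.1) q.2)) := by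
  unfold solution_alt
  cases hdy : (p.zip s).map (fun q => pyCeilDiv (100 - q.1) q.2) with
  | nil => simp [pvDiffs, groupLens]
  | cons d t =>
      simp only
      rw [pmax_eq d t]
      have hflt : (List.range' 1 ((d :: t).length - 1)).filter
          (fun i => decide ((d :: t).getD i 0 > (d :: pm d t).getD (i - 1) 0))
            = cutIdx d 1 t := by
        have hl : (d :: t).length - 1 = t.length := by simp
        rw [hl]
        apply cuts_eq t d 1
        intro r hr
        have h2 : (d :: t).getD (1 + r) 0 = t.getD r 0 := by
          rw [show 1 + r = r + 1 by omega]; simp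
        show decide ((d :: t).getD (1 + r) 0 > (d :: pm d t).getD (1 + r - 1) 0) = _
        rw [show 1 + r - 1 = r by omega, h2]
      rw [hflt]
      have hlen : (d :: t).length = 1 + t.length := by rw [List.length_cons]; omega
      rw [hlen]
      have hdg := diffs_grp t d 1 0
      simp only [List.cons_append, List.nil_append] at hdg ⊢
      rw [hdg]
      norm_num [groupLens]

-- ===== VERDICT (by name: the statement is the Claim_ definition above) =====
theorem solution_spec : Claim_equal_solution := by
  intro p s _ hpre
  unfold Spec_solution
  rw [solution_eq_groupLens p s hpre.1, alt_eq_groupLens p s]
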